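-- pv_equiv track=rewrite | github.com/tnakaicode/jburkardt-python | i4lib/i4_not.py | i4_not
-- ===== SOURCE A (Python) =====
-- def i4_not ( i, j ):
--
-- #*****************************************************************************80
-- #
-- ## I4_NOT calculates the NOT of an I4 with respect to a maximum value.
-- #
-- #  Discussion:
-- #
-- #    An I4 is an integer value.
-- #
-- #  Licensing:
-- #
-- #    This code is distributed under the GNU LGPL license.
-- #
-- #  Modified:
-- #
-- #    03 January 2016
-- #
-- #  Author:
-- #
-- #    John Burkardt
-- #
-- #  Parameters:
-- #
-- #    Input, integer I, the value whose NOT is needed.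
-- #
-- #    Input, integer J, the maximum value.
-- #
-- #    Output, integer VALUE, the NOT of I with respect to J.
-- #
--   i1 = i
--   j1 = j
--   value = 0
--   l = 1
--
--   while ( j1 != 0 ):
--
--     i2 = i1 // 2
--
--     if ( i1 == 2 * i2 ):
--       value = value + l
--
--     i1 = i2
--     l = 2 * l
--
--     j1 = j1 // 2
--
--   return value
-- ===== SOURCE B (Python) =====
-- def i4_not(i, j):
--     # Closed form: NOT of i within j's bit width, no loop.
--     n = j.bit_length()
--     return (~i) & ((1 << n) - 1)
-- ===== Notes on version B (the rewrite author's own statement) =====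
-- stated objective: simpler
-- what changed: replaces the bit-by-bit while loop with a single closed-form masking expression (~i) & ((1 << j.bit_length()) - 1)
import Mathlib
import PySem

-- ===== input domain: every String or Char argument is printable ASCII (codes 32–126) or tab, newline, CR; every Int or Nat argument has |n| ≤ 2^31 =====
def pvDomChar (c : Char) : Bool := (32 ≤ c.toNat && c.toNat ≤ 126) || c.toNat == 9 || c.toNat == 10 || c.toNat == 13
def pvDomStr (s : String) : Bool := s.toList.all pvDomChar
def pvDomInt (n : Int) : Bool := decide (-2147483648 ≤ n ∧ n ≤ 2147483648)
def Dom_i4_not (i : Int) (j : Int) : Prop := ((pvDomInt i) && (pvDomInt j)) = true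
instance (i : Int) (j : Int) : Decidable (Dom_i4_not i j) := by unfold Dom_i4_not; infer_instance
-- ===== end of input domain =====

-- B replaces A's bit-by-bit loop with the closed form (~i) & ((1 << j.bit_length()) - 1).

-- ===== PORT A =====
-- the while loop of A, state (i1, value, l, j1); for j1 < 0 Python loops forever
-- (excluded by Pre_), the port returns the accumulator there to stay total.
def i4_notLoop (i1 : Int) (value : Int) (l : Int) (j1 : Int) : Int :=
  if j1 ≤ 0 then value
  else
    let i2 := PySem.Int.floordiv i1 2
    let value' := if i1 = 2 * i2 then value + l else value
    i4_notLoop i2 value' (2 * l) (PySem.Int.floordiv j1 2)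
termination_by j1.toNat
decreasing_by
  simp only [PySem.Int.floordiv, Int.fdiv_eq_ediv]
  omega

def i4_not (i : Int) (j : Int) : Int :=
  i4_notLoop i 0 1 j

-- ===== PORT B =====
def i4_not_alt (i : Int) (j : Int) : Int :=
  PySem.Int.band (Int.not i) (((1:Int) <<< PySem.Int.bitLength j) - 1)

-- ===== PRECONDITION & SPEC =====
-- Pre_ excludes j < 0, on which A's while loop never terminates (j1 // 2 stalls at -1).
def Pre_i4_not (i : Int) (j : Int) : Prop := 0 ≤ j
instance (i : Int) (j : Int) : Decidable (Pre_i4_not i j) := by unfold Pre_i4_not; infer_instance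
def pvWitness_i4_not : Int × Int := (5, 12)

def Spec_i4_not (i : Int) (j : Int) (out : Int) : Prop := out = i4_not_alt i j
instance (i : Int) (j : Int) (out : Int) : Decidable (Spec_i4_not i j out) := by unfold Spec_i4_not; infer_instance

-- ===== CLAIM (what is proved, stated in full; the proofs are below) =====
def Claim_equal_i4_not : Prop := ∀ (i : Int) (j : Int), Dom_i4_not i j → Pre_i4_not i j → Spec_i4_not i j (i4_not i j)

-- ===== LEMMAS AND PROOFS =====

theorem int_not_eq (i : Int) : Int.not i = -i - 1 := by
  cases i <;> simp [Int.not] <;> omega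

-- splitting one bit off an Int emod by a power of two
theorem emod_two_pow_succ (a : Int) (n : Nat) :
    a % (2 * 2 ^ n) = 2 * ((a / 2) % 2 ^ n) + a % 2 := by
  have hM : (0:Int) < 2 ^ n := by positivity
  have h1 : (2:Int) * (a / 2) + a % 2 = a := Int.mul_ediv_add_emod a 2
  have h2 : (2:Int) ^ n * ((a / 2) / 2 ^ n) + (a / 2) % 2 ^ n = a / 2 :=
    Int.mul_ediv_add_emod (a / 2) (2 ^ n)
  have hr2 : 0 ≤ a % 2 ∧ a % 2 < 2 := ⟨Int.emod_nonneg a (by norm_num), Int.emod_lt_of_pos a (by norm_num)⟩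
  have hrn : 0 ≤ (a / 2) % 2 ^ n ∧ (a / 2) % 2 ^ n < 2 ^ n :=
    ⟨Int.emod_nonneg _ (by positivity), Int.emod_lt_of_pos _ hM⟩
  have key : a = (2 * ((a / 2) % 2 ^ n) + a % 2) + (2 * 2 ^ n) * ((a / 2) / 2 ^ n) := by
    nlinarith [h1, h2]
  calc a % (2 * 2 ^ n)
      = ((2 * ((a / 2) % 2 ^ n) + a % 2) + (2 * 2 ^ n) * ((a / 2) / 2 ^ n)) % (2 * 2 ^ n) := by
        rw [← key]
    _ = (2 * ((a / 2) % 2 ^ n) + a % 2) % (2 * 2 ^ n) := Int.add_mul_emod_self_left _ _ _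
    _ = 2 * ((a / 2) % 2 ^ n) + a % 2 := Int.emod_eq_of_lt (by omega) (by omega)

-- the loop computes value + l * (2^bitLength(j1) - 1 - i1 mod 2^bitLength(j1))
theorem i4_notLoop_eq (k : Nat) : ∀ (j1 : Int), j1.toNat = k → 0 ≤ j1 → ∀ (i1 value l : Int),
    i4_notLoop i1 value l j1 =
      value + l * ((2:Int) ^ PySem.Int.bitLength j1 - 1 - i1 % 2 ^ PySem.Int.bitLength j1) := by
  induction k using Nat.strong_induction_on with
  | _ k IH =>
    intro j1 hk hj i1 value l
    by_cases h0 : j1 = 0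
    · subst h0
      rw [i4_notLoop]
      simp [PySem.Int.bitLength_zero]
    · have hpos : 0 < j1 := by omega
      have hne : ¬ j1 ≤ 0 := by omega
      have hfd : PySem.Int.floordiv j1 2 = j1 / 2 := by
        simp [PySem.Int.floordiv, Int.fdiv_eq_ediv]
      have hfd2 : PySem.Int.floordiv i1 2 = i1 / 2 := by
        simp [PySem.Int.floordiv, Int.fdiv_eq_ediv]
      have hlt : (j1 / 2).toNat < k := by omega
      have hbl : PySem.Int.bitLength j1 = PySem.Int.bitLength (j1 / 2) + 1 := by
        rw [PySem.Int.bitLength_of_pos hpos, hfd]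
      rw [i4_notLoop]
      simp only [hne, if_false, hfd, hfd2]
      rw [IH (j1 / 2).toNat hlt (j1 / 2) rfl (by omega) (i1 / 2) _ (2 * l), hbl]
      set n := PySem.Int.bitLength (j1 / 2) with hn
      have h1 : (2:Int) * (i1 / 2) + i1 % 2 = i1 := Int.mul_ediv_add_emod i1 2
      have he : i1 % (2 ^ (n + 1)) = 2 * ((i1 / 2) % 2 ^ n) + i1 % 2 := by
        rw [pow_succ, mul_comm]; exact emod_two_pow_succ i1 n
      rw [he, pow_succ]
      rcases Int.emod_two_eq i1 with hr | hr
      · have hc : i1 = 2 * (i1 / 2) := by omega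
        simp only [if_pos hc]
        rw [hr]; ring
      · have hc : ¬ (i1 = 2 * (i1 / 2)) := by omega
        simp only [if_neg hc]
        rw [hr]; ring

theorem band_not_mask (i : Int) (n : Nat) :
    PySem.Int.band (Int.not i) ((2:Int) ^ n - 1) = 2 ^ n - 1 - i % 2 ^ n := by
  have hM : (0:Int) < 2 ^ n := by positivity
  have hMt : ((2:Int) ^ n - 1).toNat = 2 ^ n - 1 := by
    have : ((2:Int) ^ n) = ((2 ^ n : Nat) : Int) := by push_cast; ring
    omega
  rw [int_not_eq]
  by_cases hi : 0 ≤ i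
  · -- -i-1 < 0, mask ≥ 0
    have h1 : ¬ (0 ≤ -i - 1) := by omega
    simp only [PySem.Int.band, h1, if_false, if_pos (show (0:Int) ≤ 2 ^ n - 1 by omega)]
    have hneg : -(-i - 1) - 1 = i := by ring
    rw [hneg, hMt]
    have hand : (2 ^ n - 1) &&& i.toNat = i.toNat % 2 ^ n := by
      rw [Nat.land_comm, Nat.and_two_pow_sub_one_eq_mod]
    rw [hand]
    have hle : i.toNat % 2 ^ n < 2 ^ n := Nat.mod_lt _ (by positivity)
    have hcast : i % 2 ^ n = ((i.toNat % 2 ^ n : Nat) : Int) := by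
      have : i = ((i.toNat : Nat) : Int) := by omega
      rw [this]; push_cast; rfl
    omega
  · -- -i-1 ≥ 0
    have h1 : (0 ≤ -i - 1) := by omega
    simp only [PySem.Int.band, h1, if_pos, if_pos (show (0:Int) ≤ 2 ^ n - 1 by omega), if_true]
    rw [hMt]
    have hand : (-i - 1).toNat &&& (2 ^ n - 1) = (-i - 1).toNat % 2 ^ n := by
      rw [Nat.and_two_pow_sub_one_eq_mod]
    rw [hand]
    -- i = -(m+1) with m = (-i-1).toNat; show i % 2^n = 2^n - 1 - (m % 2^n)
    set m : Nat := (-i - 1).toNat with hm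
    have him : i = -((m : Int) + 1) := by omega
    have hmm : (m : Int) % 2 ^ n = ((m % 2 ^ n : Nat) : Int) := by push_cast; rfl
    have h2 : (2:Int) ^ n * ((m : Int) / 2 ^ n) + (m : Int) % 2 ^ n = (m : Int) :=
      Int.mul_ediv_add_emod _ _
    have hb : 0 ≤ (m : Int) % 2 ^ n ∧ (m : Int) % 2 ^ n < 2 ^ n :=
      ⟨Int.emod_nonneg _ (by positivity), Int.emod_lt_of_pos _ hM⟩
    have key : i = (2 ^ n - 1 - (m : Int) % 2 ^ n) + 2 ^ n * (-((m:Int) / 2 ^ n) - 1) := by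
      rw [him]; linear_combination h2
    have : i % 2 ^ n = 2 ^ n - 1 - (m : Int) % 2 ^ n := by
      calc i % 2 ^ n = ((2 ^ n - 1 - (m : Int) % 2 ^ n) + 2 ^ n * (-((m:Int) / 2 ^ n) - 1)) % 2 ^ n := by rw [← key]
        _ = (2 ^ n - 1 - (m : Int) % 2 ^ n) % 2 ^ n := Int.add_mul_emod_self_left _ _ _
        _ = _ := Int.emod_eq_of_lt (by omega) (by omega)
    omega

-- ===== VERDICT (by name: the statement is the Claim_ definition above) =====
theorem i4_not_spec : Claim_equal_i4_not := by
  intro i j _ hpre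
  unfold Spec_i4_not i4_not i4_not_alt
  rw [i4_notLoop_eq j.toNat j rfl hpre i 0 1, Int.shiftLeft_eq, one_mul, one_mul,
    band_not_mask i (PySem.Int.bitLength j)]
  ring
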